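-- pv_equiv track=rewrite | github.com/tonyganchev/leetcode | 3783.mirror-distance-of-an-integer.py | mirrorDistance
-- ===== SOURCE A (Python) =====
-- def mirrorDistance(n: int) -> int:
--     n0 = n
--     r = 0
--     while n > 0:
--         d = n % 10
--         n //= 10
--         r = 10 * r + d
--     return abs(n0 - r)
-- ===== SOURCE B (Python) =====
-- def mirrorDistance(n: int) -> int:
--     # Digit-reverse via the decimal string: walk str(n) most-significant-first,
--     # giving each digit an explicit power-of-ten weight (no div/mod loop).
--     if n <= 0:
--         return abs(n)
--     r = 0
--     p = 1
--     for c in str(n):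
--         r += int(c) * p
--         p *= 10
--     return abs(n - r)
-- ===== Notes on version B (the rewrite author's own statement) =====
-- stated objective: alternative
-- what changed: B replaces A's arithmetic while-loop (repeated %10 and //10 building the reverse as a Horner accumulator, least-significant digit first) with a single pass over the decimal string str(n) most-significant digit first, accumulating each parsed digit with an explicit power-of-ten weight and no division.
import Mathlib
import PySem

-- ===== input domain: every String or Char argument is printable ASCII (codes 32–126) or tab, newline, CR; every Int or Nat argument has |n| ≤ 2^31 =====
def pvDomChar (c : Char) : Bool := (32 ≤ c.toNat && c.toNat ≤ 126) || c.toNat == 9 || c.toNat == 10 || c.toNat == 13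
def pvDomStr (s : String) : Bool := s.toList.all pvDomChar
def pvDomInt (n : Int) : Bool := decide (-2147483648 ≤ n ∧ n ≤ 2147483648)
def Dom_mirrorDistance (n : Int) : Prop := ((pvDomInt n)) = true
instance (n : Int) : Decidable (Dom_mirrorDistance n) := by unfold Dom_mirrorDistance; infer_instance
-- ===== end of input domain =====

-- B replaces A's div/mod Horner loop with a pass over str(n) most-significant-first,
-- giving each digit an explicit power-of-ten weight (objective: alternative, no speed claim).

-- ===== PORT A =====
-- the while-loop: while n > 0: d = n % 10; n //= 10; r = 10*r + d
def mirrorLoop (m r : Int) : Int :=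
  if h : 0 < m then
    mirrorLoop (PySem.Int.floordiv m 10) (10 * r + PySem.Int.mod m 10)
  else r
termination_by m.toNat
decreasing_by
  rw [PySem.Int.floordiv_eq_ediv_of_pos (by omega)]
  omega

def mirrorDistance (n : Int) : Int :=
  ((n - mirrorLoop n 0).natAbs : Int)   -- abs(n0 - r)

-- ===== PORT B =====
-- int(c) for one character c of str(n); always a digit here, so the parse always succeeds
-- (the .getD 0 default is never taken — int() cannot raise on a digit character).
def mirrorDigit (c : Char) : Int := (PySem.Int.ofChars? [c]).getD 0

-- the for-loop over str(n): r += int(c) * p; p *= 10  (chars of str(n) via toChars = (toStr n).toList)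
def mirrorDistance_alt (n : Int) : Int :=
  if n ≤ 0 then (n.natAbs : Int)        -- abs(n)
  else
    let rp := (PySem.Int.toChars n).foldl
      (fun (rp : Int × Int) c => (rp.1 + mirrorDigit c * rp.2, rp.2 * 10)) (0, 1)
    ((n - rp.1).natAbs : Int)

-- ===== PRECONDITION & SPEC =====
def Spec_mirrorDistance (n : Int) (out : Int) : Prop := out = mirrorDistance_alt n
instance (n : Int) (out : Int) : Decidable (Spec_mirrorDistance n out) := by unfold Spec_mirrorDistance; infer_instance

-- ===== CLAIM (what is proved, stated in full; the proofs are below) =====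
def Claim_equal_mirrorDistance : Prop := ∀ (n : Int), Dom_mirrorDistance n → Spec_mirrorDistance n (mirrorDistance n)

-- ===== LEMMAS AND PROOFS =====

-- A's loop is the left fold of the Horner step over the little-endian digits of m.
lemma mirrorLoop_eq_foldl (m : Nat) : ∀ r : Int,
    mirrorLoop (m : Int) r = (Nat.digits 10 m).foldl (fun (a : Int) (d : Nat) => 10 * a + (d : Int)) r := by
  induction m using Nat.strong_induction_on with
  | _ m ih =>
    intro r
    rw [mirrorLoop]
    by_cases hm : 0 < m
    · have h10 : ((m : Int)) > 0 := by exact_mod_cast hm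
      simp only [h10, dif_pos]
      rw [(by exact_mod_cast PySem.Int.floordiv_natCast m 10 :
            PySem.Int.floordiv (m : Int) 10 = ((m / 10 : Nat) : Int)),
        (by exact_mod_cast PySem.Int.mod_natCast m 10 :
            PySem.Int.mod (m : Int) 10 = ((m % 10 : Nat) : Int)),
        ih (m / 10) (Nat.div_lt_self hm (by norm_num)),
        Nat.digits_def' (b := 10) (by norm_num) hm,
        List.foldl_cons]
    · have hm0 : m = 0 := by omega
      subst hm0
      norm_num

-- core's toDigitsCore, with enough fuel, writes the big-endian digit characters
lemma toDigitsCore_eq (fuel : Nat) : ∀ (m : Nat) (ds : List Char), 0 < m → m < fuel →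
    Nat.toDigitsCore 10 fuel m ds = ((Nat.digits 10 m).map Nat.digitChar).reverse ++ ds := by
  induction fuel with
  | zero => intro m ds hm hf; omega
  | succ f ihf =>
    intro m ds hm hf
    rw [Nat.toDigitsCore]
    rw [Nat.digits_def' (b := 10) (by norm_num) hm]
    by_cases h0 : m / 10 = 0
    · simp [h0]
    · rw [if_neg h0, ihf (m / 10) _ (Nat.pos_of_ne_zero h0)
        (by have := Nat.div_lt_self hm (by norm_num : 1 < 10); omega)]
      simp

-- str(m) for positive m is the reversed digit-character list
lemma toChars_pos (m : Nat) (hm : 0 < m) :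
    PySem.Int.toChars (m : Int) = ((Nat.digits 10 m).map Nat.digitChar).reverse := by
  rw [PySem.Int.toChars]
  rw [if_neg (by omega)]
  simp only [Int.toNat_natCast]
  rw [Nat.toDigits, toDigitsCore_eq (m + 1) m [] hm (by omega)]
  simp

-- parsing one digit character back gives the digit
lemma mirrorDigit_digitChar (d : Nat) (hd : d < 10) : mirrorDigit (Nat.digitChar d) = (d : Int) := by
  interval_cases d <;> decide

-- B's weighted fold over the reversed digit characters, as a fold over the digit list
lemma foldl_reverse_digits (ds : List Nat) (hds : ∀ d ∈ ds, d < 10) :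
    ((ds.map Nat.digitChar).reverse.foldl
        (fun (rp : Int × Int) c => (rp.1 + mirrorDigit c * rp.2, rp.2 * 10)) (0, 1))
      = (ds.foldr (fun (d : Nat) (rp : Int × Int) => (rp.1 + (d : Int) * rp.2, rp.2 * 10)) (0, 1)) := by
  rw [← List.map_reverse, List.foldl_map, List.foldl_reverse]
  induction ds with
  | nil => rfl
  | cons d ds ih =>
    simp only [List.foldr_cons, ih (fun x hx => hds x (List.mem_cons_of_mem d hx)),
      mirrorDigit_digitChar d (hds d (List.mem_cons_self ..))]

-- the weighted foldr computes (Horner value of the reversed reading, 10^length)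
lemma foldr_weighted (ds : List Nat) :
    (ds.foldr (fun (d : Nat) (rp : Int × Int) => (rp.1 + (d : Int) * rp.2, rp.2 * 10)) (0, 1))
      = (ds.foldl (fun (a : Int) (d : Nat) => 10 * a + (d : Int)) 0, (10 : Int) ^ ds.length) := by
  have key : ∀ (ds : List Nat) (a : Int),
      ds.foldl (fun (a : Int) (d : Nat) => 10 * a + (d : Int)) a
        = ds.foldl (fun (a : Int) (d : Nat) => 10 * a + (d : Int)) 0 + a * 10 ^ ds.length := by
    intro ds
    induction ds with
    | nil => simp
    | cons d ds ih =>
      intro a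
      simp only [List.foldl_cons, List.length_cons]
      rw [ih (10 * a + d), ih (10 * 0 + d)]
      ring
  induction ds with
  | nil => rfl
  | cons d ds ih =>
    simp only [List.foldr_cons, ih, List.length_cons]
    rw [Prod.mk.injEq]
    constructor
    · rw [List.foldl_cons, key ds (10 * 0 + (d : Int))]
      ring
    · ring

-- ===== VERDICT (by name: the statement is the Claim_ definition above) =====
theorem mirrorDistance_spec : Claim_equal_mirrorDistance := by
  intro n _
  unfold Spec_mirrorDistance mirrorDistance mirrorDistance_alt
  by_cases hn : n ≤ 0
  · rw [if_pos hn, mirrorLoop]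
    rw [dif_neg (by omega)]
    simp
  · rw [if_neg hn]
    have hm : 0 < n.toNat := by omega
    have hcast : ((n.toNat : Int)) = n := by omega
    rw [← hcast, toChars_pos n.toNat hm, foldl_reverse_digits _
      (fun d hd => Nat.digits_lt_base (by norm_num) hd), foldr_weighted,
      mirrorLoop_eq_foldl n.toNat 0]
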